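-- pv_equiv track=rewrite | github.com/bikaldev/CallBreak-Bot | utility.py | find_playable_list
-- ===== SOURCE A (Python) =====
-- def find_playable_list(list_of_cards, suit):
--     playable_list = []
--     isFace = True
--     isSpade = False
--     isNone = False
--     for card in list_of_cards:
--         if(card[1] == suit):
--             playable_list.append(card)
--
--     if(len(playable_list) == 0):
--         isFace = False
--         isSpade = True
--
--         for card in list_of_cards:
--             if(card[1] == 'S'):
--                 playable_list.append(card)
--
--         if(len(playable_list) == 0):
--             isSpade = False
--             isNone = True
--
--             playable_list = list_of_cards.copy()
--
--     return (playable_list,isFace,isSpade,isNone)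
-- ===== SOURCE B (Python) =====
-- def find_playable_list(list_of_cards, suit):
--     suit_cards = []
--     spade_cards = []
--     for card in list_of_cards:
--         if card[1] == suit:
--             suit_cards.append(card)
--         if card[1] == 'S':
--             spade_cards.append(card)
--     if suit_cards:
--         return (suit_cards, True, False, False)
--     elif spade_cards:
--         return (spade_cards, False, True, False)
--     else:
--         return (list_of_cards.copy(), False, False, True)
-- ===== Notes on version B (the rewrite author's own statement) =====
-- stated objective: alternative
-- what changed: B does one single pass over list_of_cards maintaining two accumulators (suit matches and spades) and decides the three-way outcome once afterwards, instead of A's up-to-two sequential conditional scans with emptiness checks in between.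
import Mathlib
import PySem

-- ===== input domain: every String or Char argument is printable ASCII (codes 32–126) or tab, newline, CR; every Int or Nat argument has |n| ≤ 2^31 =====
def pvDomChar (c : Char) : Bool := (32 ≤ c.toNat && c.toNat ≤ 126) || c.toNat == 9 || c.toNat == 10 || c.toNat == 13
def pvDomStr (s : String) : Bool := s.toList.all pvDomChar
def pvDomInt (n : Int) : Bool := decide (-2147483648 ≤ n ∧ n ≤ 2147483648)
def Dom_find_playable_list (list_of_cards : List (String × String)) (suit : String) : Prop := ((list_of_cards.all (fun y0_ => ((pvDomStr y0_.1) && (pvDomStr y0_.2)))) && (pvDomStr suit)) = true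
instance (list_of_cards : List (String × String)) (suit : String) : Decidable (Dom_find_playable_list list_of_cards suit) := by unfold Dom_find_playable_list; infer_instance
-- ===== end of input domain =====

-- ===== PORT A =====
def find_playable_list (list_of_cards : List (String × String)) (suit : String) : (List (String × String)) × Bool × Bool × Bool :=
  let playable_list : List (String × String) := []
  let isFace := true
  let isSpade := false
  let isNone := false
  let playable_list := list_of_cards.foldl
    (fun acc card => if card.2 == suit then acc ++ [card] else acc) playable_list
  if playable_list.length == 0 then
    let isFace := false
    let isSpade := true
    let playable_list := list_of_cards.foldl
      (fun acc card => if card.2 == "S" then acc ++ [card] else acc) playable_list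
    if playable_list.length == 0 then
      let isSpade := false
      let isNone := true
      let playable_list := list_of_cards
      (playable_list, isFace, isSpade, isNone)
    else (playable_list, isFace, isSpade, isNone)
  else (playable_list, isFace, isSpade, isNone)

-- ===== PORT B =====
-- B: one pass with two accumulators, then a single three-way decision.
def pvStepB (suit : String) (acc : List (String × String) × List (String × String))
    (card : String × String) : List (String × String) × List (String × String) :=
  let acc := if card.2 == suit then (acc.1 ++ [card], acc.2) else acc
  if card.2 == "S" then (acc.1, acc.2 ++ [card]) else acc

def find_playable_list_alt (list_of_cards : List (String × String)) (suit : String) : (List (String × String)) × Bool × Bool × Bool :=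
  let acc := list_of_cards.foldl (pvStepB suit) ([], [])
  if !acc.1.isEmpty then (acc.1, true, false, false)
  else if !acc.2.isEmpty then (acc.2, false, true, false)
  else (list_of_cards, false, false, true)

-- ===== PRECONDITION & SPEC =====
def Spec_find_playable_list (list_of_cards : List (String × String)) (suit : String) (out : (List (String × String)) × Bool × Bool × Bool) : Prop := out = find_playable_list_alt list_of_cards suit
instance (list_of_cards : List (String × String)) (suit : String) (out : (List (String × String)) × Bool × Bool × Bool) : Decidable (Spec_find_playable_list list_of_cards suit out) := by unfold Spec_find_playable_list; infer_instance

-- ===== CLAIM (what is proved, stated in full; the proofs are below) =====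
def Claim_equal_find_playable_list : Prop := ∀ (list_of_cards : List (String × String)) (suit : String), Dom_find_playable_list list_of_cards suit → Spec_find_playable_list list_of_cards suit (find_playable_list list_of_cards suit)

-- ===== LEMMAS AND PROOFS =====
-- B's paired fold computes the two filters independently.
theorem pair_fold_eq (list_of_cards : List (String × String)) (suit : String)
    (s t : List (String × String)) :
    list_of_cards.foldl (pvStepB suit) (s, t)
    = (s ++ list_of_cards.filter (fun card => card.2 == suit),
       t ++ list_of_cards.filter (fun card => card.2 == "S")) := by
  induction list_of_cards generalizing s t with
  | nil => simp
  | cons c cs ih =>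
    simp only [List.foldl_cons, List.filter_cons]
    by_cases h1 : c.2 == suit <;> by_cases h2 : c.2 == "S" <;>
      simp [pvStepB, h1, h2, ih, List.append_assoc]

theorem find_playable_list_spec : Claim_equal_find_playable_list := by
  intro list_of_cards suit _
  unfold Spec_find_playable_list find_playable_list find_playable_list_alt
  rw [pair_fold_eq]
  simp only [PySem.List.foldl_append_if_eq_filter, List.nil_append]
  by_cases h1 : list_of_cards.filter (fun card => card.2 == suit) = [] <;>
    by_cases h2 : list_of_cards.filter (fun card => card.2 == "S") = [] <;>
      simp [h1, h2]
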